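-- pv_equiv track=rewrite | github.com/mathan527/Infinity-Helix- | backend/app/services/ml_service.py | _calculate_diabetes_risk
-- ===== SOURCE A (Python) =====
-- from typing import Dict, List, Any, Optional
--
-- def _calculate_diabetes_risk(readings: List[Dict]) -> str:
--     """Calculate overall diabetes risk"""
--     if not readings:
--         return 'unknown'
--
--     high_risk = sum(1 for r in readings if r.get('risk') in ['critical', 'high'])
--     moderate_risk = sum(1 for r in readings if r.get('risk') == 'moderate')
--
--     if high_risk > 0:
--         return 'high'
--     elif moderate_risk > 0:
--         return 'moderate'
--     else:
--         return 'low'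
-- ===== SOURCE B (Python) =====
-- def _calculate_diabetes_risk(readings):
--     """Calculate overall diabetes risk"""
--     if not readings:
--         return 'unknown'
--     rank = {'critical': 2, 'high': 2, 'moderate': 1}
--     worst = 0
--     for r in readings:
--         worst = max(worst, rank.get(r.get('risk'), 0))
--     return 'high' if worst == 2 else 'moderate' if worst == 1 else 'low'
-- ===== Notes on version B (the rewrite author's own statement) =====
-- stated objective: alternative
-- what changed: Replaces A's two counting scans plus threshold branches with a single max-reduction: each reading is mapped to a numeric severity rank (critical/high=2, moderate=1, else 0), the running maximum is kept in one accumulator, and the final rank is decoded back to a label.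
import Mathlib
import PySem

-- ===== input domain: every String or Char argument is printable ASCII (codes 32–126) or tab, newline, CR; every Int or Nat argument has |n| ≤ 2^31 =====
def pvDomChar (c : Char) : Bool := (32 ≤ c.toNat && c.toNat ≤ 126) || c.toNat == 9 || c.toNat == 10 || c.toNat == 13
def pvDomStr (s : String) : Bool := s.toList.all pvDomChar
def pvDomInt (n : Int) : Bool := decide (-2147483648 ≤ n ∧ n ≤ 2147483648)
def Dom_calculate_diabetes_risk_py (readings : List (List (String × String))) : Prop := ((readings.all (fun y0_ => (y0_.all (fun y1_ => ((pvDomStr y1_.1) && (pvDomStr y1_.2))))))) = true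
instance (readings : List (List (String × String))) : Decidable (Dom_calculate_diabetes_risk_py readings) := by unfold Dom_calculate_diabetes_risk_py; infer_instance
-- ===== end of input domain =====

-- B replaces A's two counting scans with a single max-of-severity-ranks reduction decoded to a label (alternative algorithm, same cost).


-- ===== PORT A =====
-- r.get('risk') on an association-list dict (first-match lookup)
def pyGetRisk (r : List (String × String)) : Option String := (PySem.Dict.mk r).get? "risk"

-- literal port of A: two counting scans, then the threshold branches
def calculate_diabetes_risk_py (readings : List (List (String × String))) : String :=
  if readings = [] then "unknown"
  else
    let high_risk : Int := readings.foldl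
      (fun acc r => if pyGetRisk r ∈ [some "critical", some "high"] then acc + 1 else acc) 0
    let moderate_risk : Int := readings.foldl
      (fun acc r => if pyGetRisk r = some "moderate" then acc + 1 else acc) 0
    if high_risk > 0 then "high"
    else if moderate_risk > 0 then "moderate"
    else "low"

-- ===== PORT B =====
-- rank.get(r.get('risk'), 0): a None risk never matches a string key, so it takes the default 0
def pyRankOf (r : List (String × String)) : Int :=
  match pyGetRisk r with
  | some s => (PySem.Dict.mk [("critical", (2 : Int)), ("high", 2), ("moderate", 1)]).getD s 0
  | none => 0

-- literal port of B: one pass keeping the running maximum severity rank, decoded to a label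
def calculate_diabetes_risk_py_alt (readings : List (List (String × String))) : String :=
  if readings = [] then "unknown"
  else
    let worst : Int := readings.foldl (fun worst r => max worst (pyRankOf r)) 0
    if worst = 2 then "high" else if worst = 1 then "moderate" else "low"

-- ===== PRECONDITION & SPEC =====
def Spec_calculate_diabetes_risk_py (readings : List (List (String × String))) (out : String) : Prop := out = calculate_diabetes_risk_py_alt readings
instance (readings : List (List (String × String))) (out : String) : Decidable (Spec_calculate_diabetes_risk_py readings out) := by unfold Spec_calculate_diabetes_risk_py; infer_instance

-- ===== CLAIM (what is proved, stated in full; the proofs are below) =====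
def Claim_equal_calculate_diabetes_risk_py : Prop := ∀ (readings : List (List (String × String))), Dom_calculate_diabetes_risk_py readings → Spec_calculate_diabetes_risk_py readings (calculate_diabetes_risk_py readings)

-- ===== LEMMAS AND PROOFS =====

-- A's counting foldl is positive iff some element satisfies the predicate
theorem foldl_count_eq {α : Type} (p : α → Bool) (l : List α) (n : Int) :
    l.foldl (fun acc r => if p r then acc + 1 else acc) n = n + (l.countP p : Int) := by
  induction l generalizing n with
  | nil => simp
  | cons x xs ih =>
    simp only [List.foldl_cons, List.countP_cons, ih]
    by_cases h : p x <;> simp [h] <;> push_cast <;> ring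

theorem foldl_count_pos {α : Type} (p : α → Bool) (l : List α) :
    (0 < l.foldl (fun acc r => if p r then acc + 1 else acc) (0 : Int)) ↔ ∃ r ∈ l, p r := by
  rw [foldl_count_eq]
  have : (0 : Int) < (l.countP p : Int) ↔ 0 < l.countP p := by exact_mod_cast Iff.rfl
  simp only [zero_add, this, List.countP_pos_iff]

-- B's max foldl reaches at least k iff the seed does or some element's rank does
theorem foldl_max_ge {α : Type} (f : α → Int) (l : List α) (n k : Int) :
    k ≤ l.foldl (fun m r => max m (f r)) n ↔ k ≤ n ∨ ∃ r ∈ l, k ≤ f r := by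
  induction l generalizing n with
  | nil => simp
  | cons x xs ih =>
    simp only [List.foldl_cons, ih, le_max_iff, List.mem_cons]
    constructor
    · rintro ((h | h) | ⟨r, hr, hv⟩)
      · exact Or.inl h
      · exact Or.inr ⟨x, Or.inl rfl, h⟩
      · exact Or.inr ⟨r, Or.inr hr, hv⟩
    · rintro (h | ⟨r, (rfl | hr), hv⟩)
      · exact Or.inl (Or.inl h)
      · exact Or.inl (Or.inr hv)
      · exact Or.inr ⟨r, hr, hv⟩

-- every rank is 0, 1 or 2
theorem pyRank_cases (r : List (String × String)) :
    pyRankOf r = 0 ∨ pyRankOf r = 1 ∨ pyRankOf r = 2 := by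
  unfold pyRankOf
  cases h : pyGetRisk r with
  | none => left; rfl
  | some s =>
    rcases eq_or_ne s "critical" with rfl | h1
    · right; right; decide
    · rcases eq_or_ne s "high" with rfl | h2
      · right; right; decide
      · rcases eq_or_ne s "moderate" with rfl | h3
        · right; left; decide
        · left
          have c1 : ("critical" == s) = false := by simp [Ne.symm h1]
          have c2 : ("high" == s) = false := by simp [Ne.symm h2]
          have c3 : ("moderate" == s) = false := by simp [Ne.symm h3]
          simp [PySem.Dict.getD, PySem.Dict.get?, PySem.Dict.mk, List.find?, c1, c2, c3]

theorem pyRank_eq_two_iff (r : List (String × String)) :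
    pyRankOf r = 2 ↔ pyGetRisk r ∈ [some "critical", some "high"] := by
  unfold pyRankOf
  cases h : pyGetRisk r with
  | none => simp
  | some s =>
    rcases eq_or_ne s "critical" with rfl | h1
    · decide
    · rcases eq_or_ne s "high" with rfl | h2
      · decide
      · rcases eq_or_ne s "moderate" with rfl | h3
        · decide
        · have c1 : ("critical" == s) = false := by simp [Ne.symm h1]
          have c2 : ("high" == s) = false := by simp [Ne.symm h2]
          have c3 : ("moderate" == s) = false := by simp [Ne.symm h3]
          simp [PySem.Dict.getD, PySem.Dict.get?, PySem.Dict.mk, List.find?, c1, c2, c3, h1, h2]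

theorem pyRank_eq_one_iff (r : List (String × String)) :
    pyRankOf r = 1 ↔ pyGetRisk r = some "moderate" := by
  unfold pyRankOf
  cases h : pyGetRisk r with
  | none => simp
  | some s =>
    rcases eq_or_ne s "critical" with rfl | h1
    · decide
    · rcases eq_or_ne s "high" with rfl | h2
      · decide
      · rcases eq_or_ne s "moderate" with rfl | h3
        · decide
        · have c1 : ("critical" == s) = false := by simp [Ne.symm h1]
          have c2 : ("high" == s) = false := by simp [Ne.symm h2]
          have c3 : ("moderate" == s) = false := by simp [Ne.symm h3]
          simp [PySem.Dict.getD, PySem.Dict.get?, PySem.Dict.mk, List.find?, c1, c2, c3, h3]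

theorem worst_le_two (l : List (List (String × String))) :
    l.foldl (fun m r => max m (pyRankOf r)) 0 ≤ 2 := by
  by_contra h
  push_neg at h
  rcases (foldl_max_ge pyRankOf l 0 3).mp (by omega) with h3 | ⟨r, _, hr⟩
  · omega
  · rcases pyRank_cases r with h' | h' | h' <;> omega

theorem worst_nonneg (l : List (List (String × String))) :
    0 ≤ l.foldl (fun m r => max m (pyRankOf r)) 0 :=
  (foldl_max_ge pyRankOf l 0 0).mpr (Or.inl le_rfl)

-- ===== VERDICT (by name: the statement is the Claim_ definition above) =====
theorem calculate_diabetes_risk_py_spec : Claim_equal_calculate_diabetes_risk_py := by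
  intro readings _
  unfold Spec_calculate_diabetes_risk_py calculate_diabetes_risk_py calculate_diabetes_risk_py_alt
  by_cases hnil : readings = []
  · simp [hnil]
  · simp only [hnil, if_false]
    set w := readings.foldl (fun m r => max m (pyRankOf r)) 0 with hw
    have hle := worst_le_two readings
    have hge := worst_nonneg readings
    rw [← hw] at hle hge
    have hhi := foldl_count_pos
      (fun r => decide (pyGetRisk r ∈ [some "critical", some "high"])) readings
    have hmo := foldl_count_pos
      (fun r => decide (pyGetRisk r = some "moderate")) readings
    simp only [decide_eq_true_eq] at hhi hmo
    have e2 : (0 < readings.foldl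
        (fun acc r => if pyGetRisk r ∈ [some "critical", some "high"] then acc + 1 else acc) (0 : Int))
        ↔ w = 2 := by
      rw [hhi]
      constructor
      · rintro ⟨r, hr, hv⟩
        have : (2 : Int) ≤ w := (foldl_max_ge pyRankOf readings 0 2).mpr
          (Or.inr ⟨r, hr, le_of_eq ((pyRank_eq_two_iff r).mpr hv).symm⟩)
        omega
      · intro h
        rcases (foldl_max_ge pyRankOf readings 0 2).mp (le_of_eq h.symm) with h' | ⟨r, hr, hv⟩
        · omega
        · refine ⟨r, hr, (pyRank_eq_two_iff r).mp ?_⟩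
          rcases pyRank_cases r with h'' | h'' | h'' <;> omega
    have e1 : w ≠ 2 → ((0 < readings.foldl
        (fun acc r => if pyGetRisk r = some "moderate" then acc + 1 else acc) (0 : Int))
        ↔ w = 1) := by
      intro hne
      rw [hmo]
      constructor
      · rintro ⟨r, hr, hv⟩
        have : (1 : Int) ≤ w := (foldl_max_ge pyRankOf readings 0 1).mpr
          (Or.inr ⟨r, hr, le_of_eq ((pyRank_eq_one_iff r).mpr hv).symm⟩)
        omega
      · intro h
        rcases (foldl_max_ge pyRankOf readings 0 1).mp (le_of_eq h.symm) with h' | ⟨r, hr, hv⟩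
        · omega
        · rcases pyRank_cases r with h'' | h'' | h''
          · omega
          · exact ⟨r, hr, (pyRank_eq_one_iff r).mp h''⟩
          · exfalso
            have h2w : (2 : Int) ≤ w := (foldl_max_ge pyRankOf readings 0 2).mpr
              (Or.inr ⟨r, hr, le_of_eq h''.symm⟩)
            omega
    by_cases h2 : w = 2
    · rw [if_pos (e2.mpr h2), if_pos h2]
    · rw [if_neg (fun h => h2 (e2.mp h)), if_neg h2]
      by_cases h1 : w = 1
      · rw [if_pos ((e1 h2).mpr h1), if_pos h1]
      · rw [if_neg (fun h => h1 ((e1 h2).mp h)), if_neg h1]
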